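-- pv_equiv track=rewrite | github.com/dede6giu/coding-exercises | python3-9/2846.py | fibListToN
-- ===== SOURCE A (Python) =====
-- def fibListToN(N):
--     aux = N*4
--     result = list(range(1, aux + 1))
--     a, b = 2, 1
--
--     while (N + 5) > 0 and b < aux:
--         result.remove(b)
--         a, b = a+b, a
--         N -= 1
--     return result
-- ===== SOURCE B (Python) =====
-- def fibListToN(N):
--     aux = 4 * N
--     # Fibonacci numbers strictly below aux: 1, 2, 3, 5, 8, ...
--     fibs = []
--     a, b = 1, 2
--     while a < aux:
--         fibs.append(a)
--         a, b = b, a + b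
--     # emit the complement of the Fibonacci set as contiguous gap ranges
--     result = []
--     prev = 0
--     for f in fibs:
--         result.extend(range(prev + 1, f))
--         prev = f
--     result.extend(range(prev + 1, aux + 1))
--     return result
-- ===== Notes on version B (the rewrite author's own statement) =====
-- stated objective: faster
-- what changed: Instead of materialising [1..4N] and deleting each Fibonacci with list.remove (each of which shifts the whole tail), B first computes the Fibonacci numbers below 4N and then emits the complement directly as contiguous gap ranges between consecutive Fibonaccis.
import Mathlib
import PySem

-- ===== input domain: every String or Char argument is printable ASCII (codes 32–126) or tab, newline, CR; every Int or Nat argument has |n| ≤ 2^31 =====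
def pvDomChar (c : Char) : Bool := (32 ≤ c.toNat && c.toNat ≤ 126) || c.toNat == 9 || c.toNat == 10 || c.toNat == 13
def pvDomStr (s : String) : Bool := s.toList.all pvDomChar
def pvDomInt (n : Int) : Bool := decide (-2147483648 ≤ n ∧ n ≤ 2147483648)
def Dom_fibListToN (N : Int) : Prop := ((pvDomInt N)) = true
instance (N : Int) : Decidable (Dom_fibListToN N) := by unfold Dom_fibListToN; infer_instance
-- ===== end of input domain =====

-- B replaces A's "build [1..4N], then list.remove each Fibonacci" with: compute the
-- Fibonaccis below 4N first, then emit the complement as contiguous gap ranges (faster).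

-- ===== PORT A =====
-- A's while loop; `result.remove(b)` is PySem.List.remove?; the `.getD result` default is
-- unreachable (b is always present in result, as the proofs below establish), so the port
-- agrees with the Python on every input — A never raises.
def loopA (aux N a b : Int) (result : List Int) : List Int :=
  if _h : N + 5 > 0 ∧ b < aux then
    loopA aux (N - 1) (a + b) a ((PySem.List.remove? result b).getD result)
  else result
termination_by (N + 5).toNat
decreasing_by omega

def fibListToN (N : Int) : List Int :=
  loopA (N * 4) N 2 1 (PySem.List.pyRange 1 (N * 4 + 1) 1)

-- ===== PORT B =====
-- Source B's first while loop (collect Fibonaccis a = 1,2,3,5,… strictly below aux).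
-- The two Prop arguments only justify termination (a strictly increases); they hold at the
-- call site and are maintained verbatim.
def fibsB (aux a b : Int) (ha : 0 < a) (hab : a < b) : List Int :=
  if _h : a < aux then a :: fibsB aux b (a + b) (by omega) (by omega) else []
termination_by (aux - a).toNat
decreasing_by omega

-- Source B's for-loop body: result.extend(range(prev+1, f)); prev = f
def gapStep (s : Int × List Int) (f : Int) : Int × List Int :=
  (f, s.2 ++ PySem.List.pyRange (s.1 + 1) f 1)

def fibListToN_alt (N : Int) : List Int :=
  let aux := 4 * N
  let fibs := fibsB aux 1 2 (by omega) (by omega)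
  let s := fibs.foldl gapStep (0, [])
  s.2 ++ PySem.List.pyRange (s.1 + 1) (aux + 1) 1

-- ===== PRECONDITION & SPEC =====
def Spec_fibListToN (N : Int) (out : List Int) : Prop := out = fibListToN_alt N
instance (N : Int) (out : List Int) : Decidable (Spec_fibListToN N out) := by unfold Spec_fibListToN; infer_instance

-- ===== CLAIM (what is proved, stated in full; the proofs are below) =====
def Claim_equal_fibListToN : Prop := ∀ (N : Int), Dom_fibListToN N → Spec_fibListToN N (fibListToN N)

-- ===== LEMMAS AND PROOFS =====

-- Fibonacci outgrows 4n: needed to show A's (N+5) iteration cap never fires.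
lemma four_mul_le_fib (n : Nat) : 4 * n ≤ Nat.fib (n + 6) := by
  induction n with
  | zero => decide
  | succ m ih =>
      have h5 : (5 : Nat) ≤ Nat.fib (m + 5) := by
        calc (5 : Nat) = Nat.fib 5 := by decide
        _ ≤ Nat.fib (m + 5) := Nat.fib_mono (by omega)
      have : Nat.fib (m + 1 + 6) = Nat.fib (m + 5) + Nat.fib (m + 6) := Nat.fib_add_two
      omega

lemma fib_cast_pos (k : Nat) : (0 : Int) < (Nat.fib (k + 2) : Int) := by
  exact_mod_cast Nat.fib_pos.mpr (by omega)

lemma fib_cast_lt (k : Nat) : ((Nat.fib (k + 2) : Int)) < (Nat.fib (k + 3) : Int) := by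
  exact_mod_cast Nat.fib_lt_fib_succ (n := k + 2) (by omega)

-- removing v from R ++ [lo..hi-1] when every element of R is below v and lo ≤ v < hi
lemma remove_range (lo hi v : Int) (hlo : lo ≤ v) (hhi : v < hi) :
    PySem.List.remove? (PySem.List.pyRange lo hi 1) v
      = some (PySem.List.pyRange lo v 1 ++ PySem.List.pyRange (v + 1) hi 1) := by
  have hm : (v - lo).toNat + lo = v := by omega
  generalize hn : (v - lo).toNat = n at hm
  induction n generalizing lo with
  | zero =>
      have hlv : lo = v := by omega
      subst hlv
      rw [PySem.List.pyRange_one_cons (show lo < hi by omega), PySem.List.remove?_cons_self,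
        PySem.List.pyRange_one_eq_nil (a := lo) (b := lo) (le_refl lo), List.nil_append]
  | succ m ih =>
      have hlt : lo < v := by omega
      rw [PySem.List.pyRange_one_cons (a := lo) (b := hi) (by omega),
        PySem.List.remove?_cons_of_ne _ (show lo ≠ v by omega),
        ih (lo + 1) (by omega) (by omega) (by omega),
        PySem.List.pyRange_one_cons (a := lo) (b := v) (by omega)]
      rfl

lemma remove_mid (R : List Int) (lo hi v : Int) (hR : ∀ x ∈ R, x < v)
    (hlo : lo ≤ v) (hhi : v < hi) :
    PySem.List.remove? (R ++ PySem.List.pyRange lo hi 1) v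
      = some ((R ++ PySem.List.pyRange lo v 1) ++ PySem.List.pyRange (v + 1) hi 1) := by
  induction R with
  | nil => simpa using remove_range lo hi v hlo hhi
  | cons x t ih =>
      have hx : x ≠ v := by have := hR x (by simp); omega
      rw [List.cons_append, PySem.List.remove?_cons_of_ne _ hx,
        ih (fun y hy => hR y (by simp [hy]))]
      rfl

-- the bridge: A's removal loop, started on R ++ [prev+1 .. 4N0], equals B's gap-walk over
-- the remaining Fibonaccis fib(k+2), fib(k+3), …
-- fibsB depends only on the value arguments (its Prop arguments are proof-irrelevant)
lemma fibsB_congr (aux a a' b b' : Int) (ha : a = a') (hb : b = b') (h1 : 0 < a)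
    (h2 : a < b) (h1' : 0 < a') (h2' : a' < b') :
    fibsB aux a b h1 h2 = fibsB aux a' b' h1' h2' := by subst ha; subst hb; rfl

lemma bridge (M : Nat) : ∀ (k : Nat) (N0 prev : Int) (R : List Int),
    (4 * N0 - (Nat.fib (k + 2) : Int)).toNat ≤ M →
    prev < (Nat.fib (k + 2) : Int) →
    (∀ x ∈ R, x ≤ prev) →
    loopA (4 * N0) (N0 - k) (Nat.fib (k + 3)) (Nat.fib (k + 2))
        (R ++ PySem.List.pyRange (prev + 1) (4 * N0 + 1) 1)
      = (let s := (fibsB (4 * N0) (Nat.fib (k + 2)) (Nat.fib (k + 3))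
            (fib_cast_pos k) (fib_cast_lt k)).foldl gapStep (prev, R)
         s.2 ++ PySem.List.pyRange (s.1 + 1) (4 * N0 + 1) 1) := by
  induction M with
  | zero =>
      intro k N0 prev R hM hprev hR
      have hstop : ¬ ((Nat.fib (k + 2) : Int) < 4 * N0) := by omega
      rw [loopA, fibsB]
      simp [hstop]
  | succ M ih =>
      intro k N0 prev R hM hprev hR
      by_cases hlt : ((Nat.fib (k + 2) : Int) < 4 * N0)
      · have h23 := fib_cast_lt k
        have e2 : k + 1 + 2 = k + 3 := by omega
        have e3 : k + 1 + 3 = k + 4 := by omega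
        have hfibn : Nat.fib (k + 4) = Nat.fib (k + 2) + Nat.fib (k + 3) := by
          have h := Nat.fib_add_two (n := k + 2)
          have e : k + 2 + 2 = k + 4 := by omega
          have e' : k + 2 + 1 = k + 3 := by omega
          rw [e, e'] at h; exact h
        -- the (N+5) cap never fires: k < N0 + 5
        have hk : (N0 - k) + 5 > 0 := by
          by_contra hcap
          have hN0pos : 0 < N0 := by have := fib_cast_pos k; omega
          have hk5 : (N0.toNat : Int) + 5 ≤ (k : Int) := by omega
          have h1 : 4 * N0.toNat ≤ Nat.fib (N0.toNat + 6) := four_mul_le_fib N0.toNat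
          have h2 : Nat.fib (N0.toNat + 6) ≤ Nat.fib (k + 2) := Nat.fib_mono (by
            have : N0.toNat + 5 ≤ k := by exact_mod_cast hk5
            omega)
          have : ((4 * N0.toNat : Nat) : Int) ≤ (Nat.fib (k + 2) : Int) := by
            exact_mod_cast le_trans h1 h2
          omega
        have hIH := ih (k + 1) N0 ((Nat.fib (k + 2) : Int))
          (R ++ PySem.List.pyRange (prev + 1) ((Nat.fib (k + 2) : Int)) 1)
          (by rw [e2]; omega)
          (by rw [e2]; exact h23)
          (by
            intro x hx
            rcases List.mem_append.mp hx with h | h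
            · have := hR x h; omega
            · have := (PySem.List.mem_pyRange_one).mp h; omega)
        simp only [e2, e3] at hIH
        have hN : N0 - (k : Int) - 1 = N0 - ((k + 1 : Nat) : Int) := by push_cast; ring
        have hsum : ((Nat.fib (k + 3) : Int)) + ((Nat.fib (k + 2) : Int))
            = ((Nat.fib (k + 4) : Int)) := by push_cast [hfibn]; ring
        have hsum' : ((Nat.fib (k + 2) : Int)) + ((Nat.fib (k + 3) : Int))
            = ((Nat.fib (k + 4) : Int)) := by push_cast [hfibn]; ring
        rw [loopA, dif_pos ⟨hk, hlt⟩,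
          remove_mid R (prev + 1) (4 * N0 + 1) _
            (fun x hx => by have := hR x hx; omega) (by omega) (by omega),
          Option.getD_some, hN, hsum, hIH]
        conv_rhs => rw [fibsB]
        simp only [hlt, dif_pos, List.foldl_cons]
        rw [show gapStep (prev, R) ((Nat.fib (k + 2) : Int))
            = ((Nat.fib (k + 2) : Int),
               R ++ PySem.List.pyRange (prev + 1) ((Nat.fib (k + 2) : Int)) 1) from rfl]
        have hfibnZ : ((Nat.fib (k + 4) : Int))
            = ((Nat.fib (k + 2) : Int)) + ((Nat.fib (k + 3) : Int)) := by exact_mod_cast hfibn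
        have h2pos := fib_cast_pos k
        rw [fibsB_congr (4 * N0) ((Nat.fib (k + 3) : Int)) ((Nat.fib (k + 3) : Int))
          (((Nat.fib (k + 2) : Int)) + ((Nat.fib (k + 3) : Int))) ((Nat.fib (k + 4) : Int))
          rfl hsum' (by exact_mod_cast Nat.fib_pos.mpr (by omega)) (by omega)
          (by exact_mod_cast Nat.fib_pos.mpr (by omega)) (by omega)]
      · rw [loopA, fibsB]
        simp [hlt]

-- ===== VERDICT (by name: the statement is the Claim_ definition above) =====
theorem fibListToN_spec : Claim_equal_fibListToN := by
  intro N _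
  show fibListToN N = fibListToN_alt N
  have hb := bridge ((4 * N - 1).toNat) 0 N 0 []
    (by simp) (by simp) (by simp)
  simp only [show (0 : Nat) + 3 = 3 from rfl, show (0 : Nat) + 2 = 2 from rfl,
    Nat.cast_zero, sub_zero, List.nil_append, zero_add] at hb
  simp only [show ((Nat.fib 3 : Nat) : Int) = 2 from by decide,
    show ((Nat.fib 2 : Nat) : Int) = 1 from by decide] at hb
  unfold fibListToN fibListToN_alt
  rw [show N * 4 = 4 * N from by ring]
  exact hb
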